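-- pv_equiv track=rewrite | github.com/reymonzakhary/print | plugins/de-groot/services/sync.py | compute_excludes
-- ===== SOURCE A (Python) =====
-- from collections import defaultdict
-- from typing import Any, Dict, List, Tuple, Set
--
-- def compute_excludes(option_to_segments: Dict[str, str], all_articlecodes: List[str]) -> Dict[str, List[Dict[str, str]]]:
--     """Compute single and pairwise excludes from mapping and articlecodes.
--
--     Returns:
--       {
--         "singles": [{"option_key": str, "segment": str}],
--         "pairs": [
--           {"option_key_1": str, "segment_1": str, "option_key_2": str, "segment_2": str}
--         ]
--       }
--     """
--     # Build set representation of all articlecodes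
--     articlecode_sets: List[Set[str]] = []
--     for ac in all_articlecodes:
--         ac_set = set([p.strip().upper() for p in str(ac).split('-') if str(p).strip()])
--         if ac_set:
--             articlecode_sets.append(ac_set)
--
--     # Presence index: segment -> set of row indices where it appears
--     segment_to_rows: Dict[str, Set[int]] = defaultdict(set)
--     for idx, sset in enumerate(articlecode_sets):
--         for seg in sset:
--             segment_to_rows[seg].add(idx)
--
--     # Reverse mapping: segment -> option key (first one wins if duplicates)
--     option_by_segment: Dict[str, str] = {}
--     for opt_key, seg in option_to_segments.items():
--         seg_up = str(seg).upper()
--         if seg_up not in option_by_segment: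
--             option_by_segment[seg_up] = opt_key
--
--     # Singles: option whose segment never appears
--     singles: List[Dict[str, str]] = []
--     for opt_key, seg in option_to_segments.items():
--         seg_up = str(seg).upper()
--         if len(segment_to_rows.get(seg_up, set())) == 0:
--             singles.append({"option_key": opt_key, "segment": seg})
--
--     # Pairs: segments that each appear somewhere but never co-occur
--     # Collect only actually-present segments to limit pairs
--     present_segments: List[str] = sorted([s for s, rows in segment_to_rows.items() if rows])
--
--     pairs: List[Dict[str, str]] = []
--     for i in range(len(present_segments)):
--         s1 = present_segments[i]
--         rows1 = segment_to_rows[s1]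
--         for j in range(i + 1, len(present_segments)):
--             s2 = present_segments[j]
--             # If they never co-occur in any row, it's a pairwise exclude
--             if rows1.isdisjoint(segment_to_rows[s2]):
--                 ok1 = option_by_segment.get(s1, s1)
--                 ok2 = option_by_segment.get(s2, s2)
--                 pairs.append({
--                     "option_key_1": ok1,
--                     "segment_1": s1,
--                     "option_key_2": ok2,
--                     "segment_2": s2,
--                 })
--
--     return {"singles": singles, "pairs": pairs}
-- ===== SOURCE B (Python) =====
-- def compute_excludes(option_to_segments, all_articlecodes):
--     """Compute single and pairwise excludes from mapping and articlecodes.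
--
--     One pass over the rows builds the set of present segments and the set of
--     ordered pairs that co-occur in some row; each candidate pair is then a
--     single set lookup instead of a row-set intersection test.
--     """
--     present = set()
--     cooccur = set()
--     for ac in all_articlecodes:
--         row = set(p.strip().upper() for p in str(ac).split('-') if str(p).strip())
--         present |= row
--         for a in row:
--             for b in row:
--                 if a < b:
--                     cooccur.add((a, b))
--
--     option_by_segment = {}
--     for opt_key, seg in option_to_segments.items():
--         seg_up = str(seg).upper()
--         if seg_up not in option_by_segment:
--             option_by_segment[seg_up] = opt_key
--
--     singles = [{"option_key": opt_key, "segment": seg}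
--                for opt_key, seg in option_to_segments.items()
--                if str(seg).upper() not in present]
--
--     ps = sorted(present)
--     pairs = []
--     for i, s1 in enumerate(ps):
--         for s2 in ps[i + 1:]:
--             if (s1, s2) not in cooccur:
--                 pairs.append({"option_key_1": option_by_segment.get(s1, s1),
--                               "segment_1": s1,
--                               "option_key_2": option_by_segment.get(s2, s2),
--                               "segment_2": s2})
--
--     return {"singles": singles, "pairs": pairs}
-- ===== Notes on version B (the rewrite author's own statement) =====
-- stated objective: alternative
-- what changed: Instead of A's row-index map and a row-set disjointness test for every segment pair, B makes one pass over the rows building the set of present segments and the set of ordered segment pairs that co-occur in some row, so each candidate pair is one set lookup.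
import Mathlib
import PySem

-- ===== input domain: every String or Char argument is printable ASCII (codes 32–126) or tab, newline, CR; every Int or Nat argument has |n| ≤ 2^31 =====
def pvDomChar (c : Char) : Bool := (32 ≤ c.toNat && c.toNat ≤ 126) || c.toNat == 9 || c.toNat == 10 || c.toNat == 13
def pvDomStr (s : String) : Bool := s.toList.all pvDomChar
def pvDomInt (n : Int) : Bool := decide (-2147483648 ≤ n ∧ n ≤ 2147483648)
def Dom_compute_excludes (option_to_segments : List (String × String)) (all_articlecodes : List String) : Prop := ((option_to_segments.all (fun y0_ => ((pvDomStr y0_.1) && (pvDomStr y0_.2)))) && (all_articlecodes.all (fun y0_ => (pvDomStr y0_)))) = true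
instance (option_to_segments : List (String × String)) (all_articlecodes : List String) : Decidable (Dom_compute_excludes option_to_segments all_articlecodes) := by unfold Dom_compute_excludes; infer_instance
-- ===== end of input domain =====

-- B replaces A's per-pair row-set disjointness tests by one precomputed set of
-- co-occurring segment pairs built in a single pass over the rows (alternative
-- algorithm; the row-index map disappears).  Equivalence is proved on all inputs.

-- ===== PORT A =====
-- shared helper: the per-articlecode row-set expression, identical in both Pythons
-- set([p.strip().upper() for p in str(ac).split('-') if str(p).strip()])
def pvRowSet (ac : String) : PySem.Set String :=
  PySem.Set.ofList ((((PySem.Str.split? ac "-").getD []).filter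
      (fun p => PySem.Str.strip p ≠ "")).map (fun p => PySem.Str.upper (PySem.Str.strip p)))

-- shared helper: reverse mapping segment -> option key (first wins), identical in both Pythons
def pvOptionBySegment (ots : List (String × String)) : PySem.Dict String String :=
  ots.foldl (fun d p =>
    let seg_up := PySem.Str.upper p.2
    if d.contains seg_up then d else d.insert seg_up p.1) PySem.Dict.empty

-- A: segment -> set of row indices where it appears (defaultdict(set) over enumerate)
def pvSegRows (rows : List (PySem.Set String)) : PySem.Dict String (PySem.Set Int) :=
  (PySem.List.enumerate rows).foldl
    (fun d is => is.2.foldl (fun d seg => d.modify seg PySem.Set.empty (fun s => s.add is.1)) d)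
    PySem.Dict.empty

-- A: the i / j in range(i+1, …) double loop over present_segments
def pvPairsA (segd : PySem.Dict String (PySem.Set Int)) (obs : PySem.Dict String String) :
    List String → List (List (String × String))
  | [] => []
  | s1 :: rest =>
      let rows1 := segd.getD s1 PySem.Set.empty
      rest.foldl (fun acc s2 =>
        if PySem.Set.isdisjoint rows1 (segd.getD s2 PySem.Set.empty) then
          acc ++ [[("option_key_1", obs.getD s1 s1), ("segment_1", s1),
                   ("option_key_2", obs.getD s2 s2), ("segment_2", s2)]]
        else acc) [] ++ pvPairsA segd obs rest

def compute_excludes (option_to_segments : List (String × String)) (all_articlecodes : List String) : List (String × List (List (String × String))) :=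
  let articlecode_sets : List (PySem.Set String) :=
    all_articlecodes.foldl (fun sets ac =>
      let ac_set := pvRowSet ac
      if ac_set ≠ [] then sets ++ [ac_set] else sets) []
  let segment_to_rows := pvSegRows articlecode_sets
  let option_by_segment := pvOptionBySegment option_to_segments
  let singles : List (List (String × String)) :=
    option_to_segments.foldl (fun acc p =>
      if PySem.Set.len (segment_to_rows.getD (PySem.Str.upper p.2) PySem.Set.empty) = 0 then
        acc ++ [[("option_key", p.1), ("segment", p.2)]]
      else acc) []
  let present_segments : List String :=
    PySem.List.sorted ((segment_to_rows.items.filter (fun p => p.2 ≠ [])).map (·.1)) (fun s => s) false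
  [("singles", singles), ("pairs", pvPairsA segment_to_rows option_by_segment present_segments)]

-- ===== PORT B =====
-- B: add every ordered pair (a, b), a < b, of one row to the co-occurrence set
def pvCoAdd (row : PySem.Set String) (co : PySem.Set (String × String)) : PySem.Set (String × String) :=
  row.foldl (fun co a => row.foldl (fun co b => if a < b then co.add (a, b) else co) co) co

-- B: for i, s1 in enumerate(ps): for s2 in ps[i+1:] — one membership test per pair
def pvPairsB (obs : PySem.Dict String String) (co : PySem.Set (String × String)) :
    List String → List (List (String × String))
  | [] => []
  | s1 :: rest =>
      rest.foldl (fun acc s2 =>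
        if !(co.contains (s1, s2)) then
          acc ++ [[("option_key_1", obs.getD s1 s1), ("segment_1", s1),
                   ("option_key_2", obs.getD s2 s2), ("segment_2", s2)]]
        else acc) [] ++ pvPairsB obs co rest

def compute_excludes_alt (option_to_segments : List (String × String)) (all_articlecodes : List String) : List (String × List (List (String × String))) :=
  let pc :=
    all_articlecodes.foldl (fun (pc : PySem.Set String × PySem.Set (String × String)) ac =>
      let row := pvRowSet ac
      (PySem.Set.union pc.1 row, pvCoAdd row pc.2)) (PySem.Set.empty, PySem.Set.empty)
  let present := pc.1
  let cooccur := pc.2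
  let option_by_segment := pvOptionBySegment option_to_segments
  let singles : List (List (String × String)) :=
    (option_to_segments.filter (fun p => !(present.contains (PySem.Str.upper p.2)))).map
      (fun p => [("option_key", p.1), ("segment", p.2)])
  let ps := PySem.List.sorted present (fun s => s) false
  [("singles", singles), ("pairs", pvPairsB option_by_segment cooccur ps)]

-- ===== PRECONDITION & SPEC =====
def Spec_compute_excludes (option_to_segments : List (String × String)) (all_articlecodes : List String) (out : List (String × List (List (String × String)))) : Prop := out = compute_excludes_alt option_to_segments all_articlecodes
instance (option_to_segments : List (String × String)) (all_articlecodes : List String) (out : List (String × List (List (String × String)))) : Decidable (Spec_compute_excludes option_to_segments all_articlecodes out) := by unfold Spec_compute_excludes; infer_instance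

-- ===== CLAIM (what is proved, stated in full; the proofs are below) =====
def Claim_equal_compute_excludes : Prop := ∀ (option_to_segments : List (String × String)) (all_articlecodes : List String), Dom_compute_excludes option_to_segments all_articlecodes → Spec_compute_excludes option_to_segments all_articlecodes (compute_excludes option_to_segments all_articlecodes)

-- ===== LEMMAS AND PROOFS =====

-- A's list of nonempty row sets, and B's fused present/co-occurrence pass, as named terms
def pvRowsOf (acs : List String) : List (PySem.Set String) :=
  (acs.filter (fun ac => pvRowSet ac ≠ [])).map pvRowSet

def pvPC (acs : List String) : PySem.Set String × PySem.Set (String × String) :=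
  acs.foldl (fun pc ac => (PySem.Set.union pc.1 (pvRowSet ac), pvCoAdd (pvRowSet ac) pc.2))
    (PySem.Set.empty, PySem.Set.empty)

lemma pvPC_def (acs : List String) :
    acs.foldl (fun (pc : PySem.Set String × PySem.Set (String × String)) ac =>
        (PySem.Set.union pc.1 (pvRowSet ac), pvCoAdd (pvRowSet ac) pc.2))
      (PySem.Set.empty, PySem.Set.empty) = pvPC acs := rfl

lemma rows_foldl_eq (acs : List String) (acc : List (PySem.Set String)) :
    acs.foldl (fun sets ac =>
      let ac_set := pvRowSet ac
      if ac_set ≠ [] then sets ++ [ac_set] else sets) acc = acc ++ pvRowsOf acs := by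
  induction acs generalizing acc with
  | nil => simp [pvRowsOf]
  | cons a t ih =>
    simp only [List.foldl_cons, ih]
    by_cases h : pvRowSet a ≠ []
    · simp [pvRowsOf, h]
    · simp only [ne_eq, not_not] at h
      simp [pvRowsOf, h]

-- inner loop of pvSegRows: one row updates every one of its segments' index sets
lemma segRows_inner (row : List String) (d : PySem.Dict String (PySem.Set Int)) (i : Int) (s : String) :
    (row.foldl (fun d seg => d.modify seg PySem.Set.empty (fun t => t.add i)) d).getD s PySem.Set.empty
      = if s ∈ row then (d.getD s PySem.Set.empty).add i else d.getD s PySem.Set.empty := by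
  induction row generalizing d with
  | nil => simp
  | cons seg rest ih =>
    simp only [List.foldl_cons, ih]
    rw [PySem.Dict.getD_modify]
    by_cases h1 : s ∈ rest <;> by_cases h2 : s = seg <;>
      simp [h1, h2, List.mem_cons]

lemma mem_segRows_aux (rows : List (PySem.Set String)) (n : Int)
    (d : PySem.Dict String (PySem.Set Int)) (s : String) (i : Int) :
    i ∈ ((PySem.List.enumerate rows n).foldl
        (fun d is => is.2.foldl (fun d seg => d.modify seg PySem.Set.empty (fun t => t.add is.1)) d)
        d).getD s PySem.Set.empty
      ↔ i ∈ d.getD s PySem.Set.empty ∨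
        ∃ k : Nat, ∃ h : k < rows.length, s ∈ rows[k] ∧ i = n + k := by
  induction rows generalizing n d with
  | nil => simp [PySem.List.enumerate]
  | cons r t ih =>
    rw [PySem.List.enumerate_cons]
    simp only [List.foldl_cons]
    rw [ih, segRows_inner]
    constructor
    · rintro (h | ⟨k, hk, hs, rfl⟩)
      · by_cases hr : s ∈ r
        · rw [if_pos hr, PySem.Set.mem_add] at h
          rcases h with h | rfl
          · exact Or.inl h
          · exact Or.inr ⟨0, by simp, by simpa using hr, by simp⟩
        · rw [if_neg hr] at h; exact Or.inl h
      · exact Or.inr ⟨k + 1, by simpa using hk, by simpa using hs, by push_cast; ring⟩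
    · rintro (h | ⟨k, hk, hs, rfl⟩)
      · by_cases hr : s ∈ r
        · exact Or.inl (by rw [if_pos hr, PySem.Set.mem_add]; exact Or.inl h)
        · exact Or.inl (by rwa [if_neg hr])
      · match k, hk with
        | 0, _ =>
          refine Or.inl ?_
          rw [if_pos (by simpa using hs), PySem.Set.mem_add]
          exact Or.inr (by simp)
        | (k+1), hk =>
          exact Or.inr ⟨k, by simpa using hk, by simpa using hs, by push_cast; ring⟩

lemma mem_segRows (rows : List (PySem.Set String)) (s : String) (i : Int) :
    i ∈ (pvSegRows rows).getD s PySem.Set.empty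
      ↔ ∃ k : Nat, ∃ h : k < rows.length, s ∈ rows[k] ∧ i = (k : Int) := by
  unfold pvSegRows
  rw [mem_segRows_aux]
  simp [PySem.Dict.getD_empty, PySem.Set.empty_eq]

lemma segRows_getD_ne_nil (rows : List (PySem.Set String)) (s : String) :
    (pvSegRows rows).getD s PySem.Set.empty ≠ [] ↔ ∃ row ∈ rows, s ∈ row := by
  rw [ne_eq, List.eq_nil_iff_forall_not_mem]
  push Not
  constructor
  · rintro ⟨i, hi⟩
    rw [mem_segRows] at hi
    obtain ⟨k, hk, hs, _⟩ := hi
    exact ⟨rows[k], List.getElem_mem hk, hs⟩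
  · rintro ⟨row, hrow, hs⟩
    obtain ⟨k, hk, rfl⟩ := List.mem_iff_getElem.mp hrow
    exact ⟨k, (mem_segRows rows s k).mpr ⟨k, hk, hs, rfl⟩⟩

lemma nodup_keys_segRows (rows : List (PySem.Set String)) : (pvSegRows rows).keys.Nodup := by
  unfold pvSegRows
  suffices h : ∀ (n : Int) (d : PySem.Dict String (PySem.Set Int)), d.keys.Nodup →
      ((PySem.List.enumerate rows n).foldl
        (fun d is => is.2.foldl (fun d seg => d.modify seg PySem.Set.empty (fun t => t.add is.1)) d)
        d).keys.Nodup from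
    h 0 _ PySem.Dict.nodup_keys_empty
  induction rows with
  | nil => intro n d hd; simpa [PySem.List.enumerate] using hd
  | cons r t ih =>
    intro n d hd
    rw [PySem.List.enumerate_cons]
    simp only [List.foldl_cons]
    apply ih
    rw [PySem.Dict.keys_foldl_modify r PySem.Set.empty (fun _ _ => fun t => t.add n)]
    exact PySem.Set.nodup_update _ _ hd

lemma mem_coadd_inner (a : String) (lst : List String) (co : PySem.Set (String × String))
    (q : String × String) :
    q ∈ lst.foldl (fun co b => if a < b then co.add (a, b) else co) co
      ↔ q ∈ co ∨ ∃ b ∈ lst, a < b ∧ q = (a, b) := by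
  induction lst generalizing co with
  | nil => simp
  | cons b rest ih =>
    simp only [List.foldl_cons, ih]
    by_cases h : a < b
    · rw [if_pos h, PySem.Set.mem_add]
      constructor
      · rintro ((hq | rfl) | ⟨c, hc, hac, rfl⟩)
        · exact Or.inl hq
        · exact Or.inr ⟨b, by simp, h, rfl⟩
        · exact Or.inr ⟨c, by simp [hc], hac, rfl⟩
      · rintro (hq | ⟨c, hc, hac, rfl⟩)
        · exact Or.inl (Or.inl hq)
        · rcases List.mem_cons.mp hc with rfl | hc
          · exact Or.inl (Or.inr rfl)
          · exact Or.inr ⟨c, hc, hac, rfl⟩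
    · rw [if_neg h]
      constructor
      · rintro (hq | ⟨c, hc, hac, rfl⟩)
        · exact Or.inl hq
        · exact Or.inr ⟨c, by simp [hc], hac, rfl⟩
      · rintro (hq | ⟨c, hc, hac, rfl⟩)
        · exact Or.inl hq
        · rcases List.mem_cons.mp hc with rfl | hc
          · exact absurd hac h
          · exact Or.inr ⟨c, hc, hac, rfl⟩

lemma mem_pvCoAdd (row : PySem.Set String) (co : PySem.Set (String × String)) (q : String × String) :
    q ∈ pvCoAdd row co ↔ q ∈ co ∨ (q.1 ∈ row ∧ q.2 ∈ row ∧ q.1 < q.2) := by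
  unfold pvCoAdd
  suffices h : ∀ (alst : List String) (co : PySem.Set (String × String)),
      q ∈ alst.foldl (fun co a => List.foldl (fun co b => if a < b then co.add (a, b) else co) co row) co
        ↔ q ∈ co ∨ ∃ a ∈ alst, ∃ b ∈ row, a < b ∧ q = (a, b) by
    rw [h row co]
    constructor
    · rintro (hq | ⟨a, ha, b, hb, hab, rfl⟩)
      · exact Or.inl hq
      · exact Or.inr ⟨ha, hb, hab⟩
    · rintro (hq | ⟨h1, h2, h12⟩)
      · exact Or.inl hq
      · exact Or.inr ⟨q.1, h1, q.2, h2, h12, rfl⟩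
  intro alst
  induction alst with
  | nil => simp
  | cons a rest ih =>
    intro co
    simp only [List.foldl_cons, ih, mem_coadd_inner]
    constructor
    · rintro ((hq | ⟨b, hb, hab, rfl⟩) | ⟨c, hc, hd⟩)
      · exact Or.inl hq
      · exact Or.inr ⟨a, by simp, b, hb, hab, rfl⟩
      · exact Or.inr ⟨c, by simp [hc], hd⟩
    · rintro (hq | ⟨c, hc, b, hb, hcb, rfl⟩)
      · exact Or.inl (Or.inl hq)
      · rcases List.mem_cons.mp hc with rfl | hc
        · exact Or.inl (Or.inr ⟨b, hb, hcb, rfl⟩)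
        · exact Or.inr ⟨c, hc, b, hb, hcb, rfl⟩

lemma pvPC_aux (acs : List String) (pc : PySem.Set String × PySem.Set (String × String)) :
    (acs.foldl (fun pc ac => (PySem.Set.union pc.1 (pvRowSet ac), pvCoAdd (pvRowSet ac) pc.2)) pc)
      = (acs.foldl (fun s ac => PySem.Set.union s (pvRowSet ac)) pc.1,
         acs.foldl (fun c ac => pvCoAdd (pvRowSet ac) c) pc.2) := by
  induction acs generalizing pc with
  | nil => simp
  | cons a t ih => simp only [List.foldl_cons, ih]

lemma mem_pvPC_fst (acs : List String) (s : String) :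
    s ∈ (pvPC acs).1 ↔ ∃ ac ∈ acs, s ∈ pvRowSet ac := by
  unfold pvPC
  rw [pvPC_aux]
  suffices h : ∀ (p : PySem.Set String),
      s ∈ acs.foldl (fun s ac => PySem.Set.union s (pvRowSet ac)) p ↔ s ∈ p ∨ ∃ ac ∈ acs, s ∈ pvRowSet ac by
    simp [h, PySem.Set.empty_eq]
  induction acs with
  | nil => simp
  | cons a t ih =>
    intro p
    simp only [List.foldl_cons, ih, PySem.Set.mem_union]
    constructor
    · rintro ((hp | hr) | ⟨ac, hac, hm⟩)
      · exact Or.inl hp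
      · exact Or.inr ⟨a, by simp, hr⟩
      · exact Or.inr ⟨ac, by simp [hac], hm⟩
    · rintro (hp | ⟨ac, hac, hm⟩)
      · exact Or.inl (Or.inl hp)
      · rcases List.mem_cons.mp hac with rfl | hac
        · exact Or.inl (Or.inr hm)
        · exact Or.inr ⟨ac, hac, hm⟩

lemma mem_pvPC_snd (acs : List String) (q : String × String) :
    q ∈ (pvPC acs).2 ↔ (∃ ac ∈ acs, q.1 ∈ pvRowSet ac ∧ q.2 ∈ pvRowSet ac) ∧ q.1 < q.2 := by
  unfold pvPC
  rw [pvPC_aux]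
  suffices h : ∀ (c : PySem.Set (String × String)),
      q ∈ acs.foldl (fun c ac => pvCoAdd (pvRowSet ac) c) c
        ↔ q ∈ c ∨ ∃ ac ∈ acs, q.1 ∈ pvRowSet ac ∧ q.2 ∈ pvRowSet ac ∧ q.1 < q.2 by
    rw [h]
    simp only [PySem.Set.empty_eq, List.not_mem_nil, false_or]
    constructor
    · rintro ⟨ac, hac, h1, h2, h12⟩
      exact ⟨⟨ac, hac, h1, h2⟩, h12⟩
    · rintro ⟨⟨ac, hac, h1, h2⟩, h12⟩
      exact ⟨ac, hac, h1, h2, h12⟩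
  induction acs with
  | nil => simp
  | cons a t ih =>
    intro c
    simp only [List.foldl_cons, ih, mem_pvCoAdd]
    constructor
    · rintro ((hc | hr) | ⟨ac, hac, hm⟩)
      · exact Or.inl hc
      · exact Or.inr ⟨a, by simp, hr.1, hr.2.1, hr.2.2⟩
      · exact Or.inr ⟨ac, by simp [hac], hm⟩
    · rintro (hc | ⟨ac, hac, hm⟩)
      · exact Or.inl (Or.inl hc)
      · rcases List.mem_cons.mp hac with rfl | hac
        · exact Or.inl (Or.inr ⟨hm.1, hm.2.1, hm.2.2⟩)
        · exact Or.inr ⟨ac, hac, hm⟩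

lemma nodup_pvPC_fst (acs : List String) : ((pvPC acs).1 : List String).Nodup := by
  unfold pvPC
  rw [pvPC_aux]
  suffices h : ∀ (p : PySem.Set String), p.Nodup →
      (acs.foldl (fun s ac => PySem.Set.union s (pvRowSet ac)) p).Nodup by
    exact h _ (by simp [PySem.Set.empty_eq])
  induction acs with
  | nil => exact fun p hp => hp
  | cons a t ih =>
    intro p hp
    exact ih _ (PySem.Set.nodup_union _ _ hp)

lemma exists_rowsOf (acs : List String) (P : PySem.Set String → Prop)
    (hP : ∀ r, P r → r ≠ []) :
    (∃ row ∈ pvRowsOf acs, P row) ↔ ∃ ac ∈ acs, P (pvRowSet ac) := by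
  unfold pvRowsOf
  constructor
  · rintro ⟨row, hrow, hp⟩
    obtain ⟨ac, hac, rfl⟩ := List.mem_map.mp hrow
    exact ⟨ac, (List.mem_filter.mp hac).1, hp⟩
  · rintro ⟨ac, hac, hp⟩
    exact ⟨pvRowSet ac, List.mem_map.mpr ⟨ac, List.mem_filter.mpr ⟨hac, by simpa using hP _ hp⟩, rfl⟩, hp⟩

lemma presentA_getD_iff (acs : List String) (s : String) :
    (pvSegRows (pvRowsOf acs)).getD s PySem.Set.empty ≠ [] ↔ s ∈ (pvPC acs).1 := by
  rw [segRows_getD_ne_nil, mem_pvPC_fst]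
  exact exists_rowsOf acs (fun r => s ∈ r) (fun r h => List.ne_nil_of_mem h)

lemma mem_presentA (acs : List String) (s : String) :
    s ∈ (((pvSegRows (pvRowsOf acs)).items.filter (fun p => p.2 ≠ [])).map (·.1))
      ↔ s ∈ (pvPC acs).1 := by
  rw [← presentA_getD_iff]
  constructor
  · intro h
    obtain ⟨p, hp, rfl⟩ := List.mem_map.mp h
    obtain ⟨hmem, hne⟩ := List.mem_filter.mp hp
    have hget : (pvSegRows (pvRowsOf acs)).get? p.1 = some p.2 :=
      (PySem.Dict.get?_eq_some_iff_mem_items _ _ _ (nodup_keys_segRows _)).mpr (by simpa using hmem)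
    rw [PySem.Dict.getD_eq_get?_getD, hget]
    simpa using hne
  · intro h
    rw [PySem.Dict.getD_eq_get?_getD] at h
    cases hget : (pvSegRows (pvRowsOf acs)).get? s with
    | none => rw [hget] at h; simp [PySem.Set.empty_eq] at h
    | some v =>
      rw [hget] at h
      simp only [Option.getD_some] at h
      have hmem : (s, v) ∈ (pvSegRows (pvRowsOf acs)).items :=
        (PySem.Dict.get?_eq_some_iff_mem_items _ _ _ (nodup_keys_segRows _)).mp hget
      exact List.mem_map.mpr ⟨(s, v), List.mem_filter.mpr ⟨hmem, by simpa using h⟩, rfl⟩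

lemma nodup_presentA (acs : List String) :
    ((((pvSegRows (pvRowsOf acs)).items.filter (fun p => p.2 ≠ [])).map (·.1)) : List String).Nodup := by
  have hkeys := nodup_keys_segRows (pvRowsOf acs)
  have hsub : (((pvSegRows (pvRowsOf acs)).items.filter (fun p => p.2 ≠ [])).map (·.1)).Sublist
      ((pvSegRows (pvRowsOf acs)).items.map (·.1)) :=
    List.Sublist.map _ List.filter_sublist
  exact (by simpa [PySem.Dict.keys] using hkeys :
    ((pvSegRows (pvRowsOf acs)).items.map (·.1)).Nodup).sublist hsub

lemma ps_eq (acs : List String) :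
    PySem.List.sorted (((pvSegRows (pvRowsOf acs)).items.filter (fun p => p.2 ≠ [])).map (·.1)) (fun s => s) false
      = PySem.List.sorted ((pvPC acs).1 : List String) (fun s => s) false := by
  apply PySem.List.sorted_eq_sorted_of_perm _ _ _ (fun a b h => h)
  rw [List.perm_ext_iff_of_nodup (nodup_presentA acs) (nodup_pvPC_fst acs)]
  exact mem_presentA acs

-- the two pair tests agree on a strictly ordered pair of segments
lemma test_eq (acs : List String) (s1 s2 : String) (h12 : s1 < s2) :
    PySem.Set.isdisjoint ((pvSegRows (pvRowsOf acs)).getD s1 PySem.Set.empty)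
        ((pvSegRows (pvRowsOf acs)).getD s2 PySem.Set.empty)
      = !((pvPC acs).2.contains (s1, s2)) := by
  rw [Bool.eq_iff_iff, PySem.Set.isdisjoint_iff, Bool.not_eq_true', ← Bool.not_eq_true,
    PySem.Set.contains_iff, mem_pvPC_snd]
  simp only [mem_segRows]
  constructor
  · intro h hco
    obtain ⟨⟨ac, hac, h1, h2⟩, -⟩ := hco
    have hrow : pvRowSet ac ∈ pvRowsOf acs := by
      unfold pvRowsOf
      exact List.mem_map.mpr ⟨ac, List.mem_filter.mpr ⟨hac, by simpa using List.ne_nil_of_mem h1⟩, rfl⟩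
    obtain ⟨k, hk, heq⟩ := List.mem_iff_getElem.mp hrow
    exact h (k : Int) ⟨k, hk, heq ▸ h1, rfl⟩ ⟨k, hk, heq ▸ h2, rfl⟩
  · rintro h i ⟨k, hk, hs1, hik⟩ ⟨k', hk', hs2, hik'⟩
    have hkk : k' = k := by
      have hc : (k : Int) = (k' : Int) := by rw [← hik, ← hik']
      exact_mod_cast hc.symm
    subst hkk
    apply h
    refine ⟨?_, h12⟩
    have hmem : (pvRowsOf acs)[k'] ∈ pvRowsOf acs := List.getElem_mem hk'
    unfold pvRowsOf at hmem
    obtain ⟨ac, hac, heq⟩ := List.mem_map.mp hmem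
    exact ⟨ac, (List.mem_filter.mp hac).1, by rw [heq]; exact hs1, by rw [heq]; exact hs2⟩

lemma pairs_eq (acs : List String) (obs : PySem.Dict String String) (l : List String)
    (hl : l.Pairwise (· < ·)) :
    pvPairsA (pvSegRows (pvRowsOf acs)) obs l = pvPairsB obs (pvPC acs).2 l := by
  induction hl with
  | nil => rfl
  | cons h hp ih =>
    simp only [pvPairsA, pvPairsB]
    rw [ih]
    congr 1
    rw [PySem.List.foldl_append_if, PySem.List.foldl_append_if]
    congr 1
    apply congrArg
    apply List.filter_congr
    intro x hx
    exact test_eq acs _ x (h x hx)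

lemma singles_aux (acs : List String) (ots : List (String × String))
    (acc : List (List (String × String))) :
    ots.foldl (fun acc p =>
      if PySem.Set.len ((pvSegRows (pvRowsOf acs)).getD (PySem.Str.upper p.2) PySem.Set.empty) = 0 then
        acc ++ [[("option_key", p.1), ("segment", p.2)]]
      else acc) acc
    = acc ++ (ots.filter (fun p => !((pvPC acs).1.contains (PySem.Str.upper p.2)))).map
        (fun p => [("option_key", p.1), ("segment", p.2)]) := by
  induction ots generalizing acc with
  | nil => simp
  | cons p t ih =>
    simp only [List.foldl_cons, ih, List.filter_cons]
    have hiff : PySem.Set.len ((pvSegRows (pvRowsOf acs)).getD (PySem.Str.upper p.2) PySem.Set.empty) = 0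
        ↔ ¬ (PySem.Str.upper p.2) ∈ (pvPC acs).1 := by
      rw [← presentA_getD_iff]
      simp [PySem.Set.len]
    by_cases hc : (PySem.Str.upper p.2) ∈ (pvPC acs).1
    · rw [if_neg (by rw [hiff]; exact not_not.mpr hc)]
      simp [hc]
    · rw [if_pos (hiff.mpr hc)]
      simp [hc]

lemma sorted_present_pairwise_lt (acs : List String) :
    (PySem.List.sorted ((pvPC acs).1 : List String) (fun s => s) false).Pairwise (· < ·) := by
  have h1 := PySem.List.sorted_pairwise ((pvPC acs).1 : List String) (fun s => s)
  have h2 : (PySem.List.sorted ((pvPC acs).1 : List String) (fun s => s) false).Nodup :=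
    (PySem.List.sorted_perm ((pvPC acs).1 : List String) (fun s => s) false).nodup_iff.mpr
      (nodup_pvPC_fst acs)
  exact (h1.and h2).imp (fun hab => lt_of_le_of_ne hab.1 hab.2)

-- ===== VERDICT (by name: the statement is the Claim_ definition above) =====
theorem compute_excludes_spec : Claim_equal_compute_excludes := by
  intro ots acs _
  unfold Spec_compute_excludes compute_excludes compute_excludes_alt
  simp only [rows_foldl_eq, List.nil_append, pvPC_def]
  rw [singles_aux, ps_eq, pairs_eq acs (pvOptionBySegment ots) _ (sorted_present_pairwise_lt acs)]
  simp
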